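-- pv_equiv track=rewrite | github.com/guilhermeRRS/pas | pacotePadrao.py | dontrepete_especialSingleUp
-- ===== SOURCE A (Python) =====
-- def dontrepete_especialSingleUp(arquivo):
-- 	certo = 1
-- 	erro = []
-- 	dados = []
-- 	linhas = []
-- 	linhasRepetidas = []
-- 	repetidos = []
-- 	for i in range(0, len(arquivo)):
-- 		dados.append(arquivo[i][1][0])
-- 		linhas.append(i)
-- 	for i in range(0, len(dados)):
-- 		if(dados.count(dados[i]) > 1):
-- 			if(repetidos.count(dados[i]) == 0):
-- 				repetidos.append(dados[i])
-- 				linhasRepetidas.append([linhas[i]])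
-- 			else:
-- 				linhasRepetidas[repetidos.index(dados[i])].append(linhas[i])
-- 	if(len(linhasRepetidas) > 0):
-- 		certo = 0
-- 		for i in range(0, len(linhasRepetidas)):
-- 			mensagem = "Erro, o mesmo dado ["+str(arquivo[linhasRepetidas[i][0]][1][0])+"] foi mencionado mais de uma vez, mantes em somente uma das seguintes linhas [isso não é um erro, é a indicação de uma redundância no arquivo]: "
-- 			for j in range(0, len(linhasRepetidas[i])):
-- 				if(j != 0):
-- 					if(j < len(linhasRepetidas[i]) - 1):
-- 						mensagem = mensagem+", "
-- 					else:
-- 						mensagem = mensagem+" e "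
-- 				mensagem = mensagem+str(arquivo[linhasRepetidas[i][j]][0] + 1)
-- 			erro.append(mensagem)
-- 	return certo, erro, arquivo
-- ===== SOURCE B (Python) =====
-- def dontrepete_especialSingleUp(arquivo):
-- 	erro = []
-- 	pares = [(i, linha[1][0]) for i, linha in enumerate(arquivo)]
-- 	while pares:
-- 		v = pares[0][1]
-- 		mine = [i for i, w in pares if w == v]
-- 		pares = [(i, w) for i, w in pares if w != v]
-- 		if len(mine) > 1:
-- 			partes = [str(arquivo[k][0] + 1) for k in mine]
-- 			erro.append("Erro, o mesmo dado ["+v+"] foi mencionado mais de uma vez, mantes em somente uma das seguintes linhas [isso não é um erro, é a indicação de uma redundância no arquivo]: "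
-- 				+ ", ".join(partes[:-1]) + " e " + partes[-1])
-- 	return (0 if erro else 1), erro, arquivo
-- ===== Notes on version B (the rewrite author's own statement) =====
-- stated objective: alternative
-- what changed: Replaces A's parallel-lists bookkeeping (dados.count / repetidos.count / repetidos.index scans building group lists, then a j-indexed separator loop per group) with a repeated-partition loop: take the front value, extract all its line indices in one comprehension, emit its message immediately via str.join, and continue on the remaining pairs.
import Mathlib
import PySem

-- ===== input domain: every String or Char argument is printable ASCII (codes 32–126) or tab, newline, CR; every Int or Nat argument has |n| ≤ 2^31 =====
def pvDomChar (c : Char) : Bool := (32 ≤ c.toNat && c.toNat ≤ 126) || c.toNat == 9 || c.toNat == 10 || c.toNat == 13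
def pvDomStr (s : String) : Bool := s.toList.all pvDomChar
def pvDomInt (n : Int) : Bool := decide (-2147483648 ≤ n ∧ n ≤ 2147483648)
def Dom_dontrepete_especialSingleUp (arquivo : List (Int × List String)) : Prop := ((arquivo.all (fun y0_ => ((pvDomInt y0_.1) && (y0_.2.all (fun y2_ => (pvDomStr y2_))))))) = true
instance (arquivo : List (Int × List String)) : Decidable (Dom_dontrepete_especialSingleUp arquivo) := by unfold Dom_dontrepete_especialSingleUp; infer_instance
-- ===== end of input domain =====

-- B replaces A's parallel-lists bookkeeping (count/index scans building group lists, then a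
-- j-indexed separator loop per group) with a repeated-partition loop: extract all line indices
-- of the front value in one pass, emit its message at once via join, recurse on the rest.

-- ===== PORT A =====

-- A's second loop body: the state is (repetidos, linhasRepetidas)
def pvStepA (dados : List String) (st : List String × List (List Int)) (p : Int × String) :
    List String × List (List Int) :=
  if PySem.List.count dados p.2 > 1 then
    if PySem.List.count st.1 p.2 == 0 then (st.1 ++ [p.2], st.2 ++ [[p.1]])
    else
      -- linhasRepetidas[repetidos.index(dados[i])].append(linhas[i]); the index exists here
      match PySem.List.index? st.1 p.2 with
      | some k => (st.1, st.2.modify k (fun x => x ++ [p.1]))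
      | none => st
  else st

-- A's message loop for one group g = linhasRepetidas[i] (j-indexed separators, then str(arquivo[..][0]+1))
def pvMsgA (arquivo : List (Int × List String)) (g : List Int) : String :=
  (PySem.List.enumerate g 0).foldl
    (fun m q =>
      (if q.1 ≠ 0 then (if q.1 < (g.length : Int) - 1 then m ++ ", " else m ++ " e ") else m)
      ++ PySem.Int.toStr (((PySem.List.pyGet? arquivo q.2).getD (0, [])).1 + 1))
    ("Erro, o mesmo dado ["
      ++ ((PySem.List.pyGet? (((PySem.List.pyGet? arquivo ((PySem.List.pyGet? g 0).getD 0)).getD (0, [])).2) 0).getD "")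
      ++ "] foi mencionado mais de uma vez, mantes em somente uma das seguintes linhas [isso não é um erro, é a indicação de uma redundância no arquivo]: ")

def dontrepete_especialSingleUp (arquivo : List (Int × List String)) :
    Int × List String × (List (Int × List String)) :=
  -- dados.append(arquivo[i][1][0]); the .getD is unreachable under Pre_ (IndexError otherwise)
  let dados : List String := arquivo.map (fun r => (PySem.List.pyGet? r.2 0).getD "")
  let st := (PySem.List.enumerate dados 0).foldl (pvStepA dados) ([], [])
  if st.2.length > 0 then
    (0, st.2.foldl (fun er g => er ++ [pvMsgA arquivo g]) [], arquivo)
  else (1, [], arquivo)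

-- ===== PORT B =====

-- str(arquivo[k][0] + 1); the .getD is unreachable (k is a stored valid line index)
def pvPart (arquivo : List (Int × List String)) (k : Int) : String :=
  PySem.Int.toStr (((PySem.List.pyGet? arquivo k).getD (0, [])).1 + 1)

-- one message for the value v with its line indices mine; partes[:-1] is .dropLast,
-- partes[-1] is .getLastD (exact here: pvMsgB is only reached with len(mine) > 1)
def pvMsgB (arquivo : List (Int × List String)) (v : String) (mine : List Int) : String :=
  let partes := mine.map (pvPart arquivo)
  "Erro, o mesmo dado [" ++ v
    ++ "] foi mencionado mais de uma vez, mantes em somente uma das seguintes linhas [isso não é um erro, é a indicação de uma redundância no arquivo]: "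
    ++ PySem.Str.join ", " partes.dropLast ++ " e " ++ partes.getLastD ""

-- the while loop: partition pares on the front value, emit its message, continue on the rest
def pvLoopB (arquivo : List (Int × List String)) (pares : List (Int × String))
    (erro : List String) : List String :=
  match pares with
  | [] => erro
  | p :: t =>
    let mine := ((p :: t).filter (fun q => q.2 == p.2)).map (fun q => q.1)
    pvLoopB arquivo ((p :: t).filter (fun q => !(q.2 == p.2)))
      (if mine.length > 1 then erro ++ [pvMsgB arquivo p.2 mine] else erro)
termination_by pares.length
decreasing_by
  simp only [List.filter_cons, beq_self_eq_true, Bool.not_true, List.length_cons]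
  exact Nat.lt_succ_of_le (List.length_filter_le _ t)

def dontrepete_especialSingleUp_alt (arquivo : List (Int × List String)) :
    Int × List String × (List (Int × List String)) :=
  -- pares = [(i, linha[1][0]) for i, linha in enumerate(arquivo)]
  let pares : List (Int × String) :=
    (PySem.List.enumerate arquivo 0).map (fun p => (p.1, (PySem.List.pyGet? p.2.2 0).getD ""))
  let erro := pvLoopB arquivo pares []
  (if erro.length > 0 then 0 else 1, erro, arquivo)

-- ===== PRECONDITION & SPEC =====
-- Pre_ excludes rows whose string list is empty: there Python A raises IndexError on
-- arquivo[i][1][0] (and Python B raises the same way), so A returns on exactly Pre_.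
def Pre_dontrepete_especialSingleUp (arquivo : List (Int × List String)) : Prop :=
  ∀ r ∈ arquivo, r.2 ≠ []
instance (arquivo : List (Int × List String)) : Decidable (Pre_dontrepete_especialSingleUp arquivo) := by
  unfold Pre_dontrepete_especialSingleUp; infer_instance

def pvWitness_dontrepete_especialSingleUp : (List (Int × List String)) :=
  [(0, ["a"]), (3, ["b"]), (1, ["a"])]

def Spec_dontrepete_especialSingleUp (arquivo : List (Int × List String))
    (out : Int × List String × (List (Int × List String))) : Prop :=
  out = dontrepete_especialSingleUp_alt arquivo
instance (arquivo : List (Int × List String)) (out : Int × List String × (List (Int × List String))) :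
    Decidable (Spec_dontrepete_especialSingleUp arquivo out) := by
  unfold Spec_dontrepete_especialSingleUp; infer_instance

-- ===== CLAIM (what is proved, stated in full; the proofs are below) =====
def Claim_equal_dontrepete_especialSingleUp : Prop :=
  ∀ (arquivo : List (Int × List String)), Dom_dontrepete_especialSingleUp arquivo →
    Pre_dontrepete_especialSingleUp arquivo →
    Spec_dontrepete_especialSingleUp arquivo (dontrepete_especialSingleUp arquivo)

-- ===== LEMMAS AND PROOFS =====

-- abbreviations for the proof
def pvCnt (dados : List String) (v : String) : Bool := decide (PySem.List.count dados v > 1)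
def pvS (dados : List String) (P : List (Int × String)) : List String :=
  PySem.Set.ofList ((P.filter (fun p => pvCnt dados p.2)).map (fun p => p.2))
def pvG (dados : List String) (P : List (Int × String)) (v : String) : List Int :=
  (P.filter (fun p => p.2 == v && pvCnt dados p.2)).map (fun p => p.1)

lemma pv_enumerate_map {α β : Type} (f : α → β) (xs : List α) (s : Int) :
    PySem.List.enumerate (xs.map f) s = (PySem.List.enumerate xs s).map (fun p => (p.1, f p.2)) := by
  induction xs generalizing s with
  | nil => simp [PySem.List.enumerate]
  | cons x t ih => simp [PySem.List.enumerate_cons, ih]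

lemma pv_map_modify_of_idxOf? {α β : Type} [BEq α] [LawfulBEq α] [DecidableEq α] (l : List α) (hn : l.Nodup)
    (g : α → β) (f : β → β) (w : α) (k : Nat) (hk : List.idxOf? w l = some k) :
    (l.map g).modify k f = l.map (fun v => if v = w then f (g v) else g v) := by
  obtain ⟨hkl, hw, -⟩ := List.idxOf?_eq_some_iff.mp hk
  apply List.ext_getElem
  · simp
  intro j hj1 hj2
  simp only [List.getElem_modify, List.getElem_map]
  by_cases hjk : k = j
  · subst hjk
    simp [hw]
  · rw [if_neg hjk, if_neg]
    intro hlw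
    exact hjk ((hn.getElem_inj_iff).mp (hw.trans hlw.symm))

lemma pv_add_mem {α : Type} [BEq α] [LawfulBEq α] (s : PySem.Set α) (x : α) (hx : x ∈ s) :
    PySem.Set.add s x = s := by
  simp [PySem.Set.add, PySem.Set.contains, hx]

lemma pv_add_not_mem {α : Type} [BEq α] [LawfulBEq α] (s : PySem.Set α) (x : α) (hx : x ∉ s) :
    PySem.Set.add s x = s ++ [x] := by
  simp [PySem.Set.add, PySem.Set.contains, hx]

lemma pv_ofList_append {α : Type} [BEq α] (l : List α) (x : α) :
    PySem.Set.ofList (l ++ [x]) = PySem.Set.add (PySem.Set.ofList l) x := by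
  rw [PySem.Set.ofList_eq_foldl, PySem.Set.ofList_eq_foldl, List.foldl_append]
  rfl

-- the quadratic loop of A computes exactly the set of duplicated values (first-occurrence
-- order) paired with all their line indices
lemma pv_loopA (dados : List String) (P : List (Int × String)) :
    P.foldl (pvStepA dados) ([], []) = (pvS dados P, (pvS dados P).map (pvG dados P)) := by
  induction P using List.reverseRecOn with
  | nil => simp [pvS, PySem.Set.ofList_eq_foldl]
  | append_singleton P x ih =>
    obtain ⟨i, w⟩ := x
    rw [List.foldl_append, List.foldl_cons, List.foldl_nil, ih]
    by_cases hc : PySem.List.count dados w > 1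
    · have hcb : pvCnt dados w = true := by simpa [pvCnt, PySem.List.count] using hc
      have hfa : (P ++ [(i, w)]).filter (fun p => pvCnt dados p.2)
          = P.filter (fun p => pvCnt dados p.2) ++ [(i, w)] := by
        simp [List.filter_append, hcb]
      by_cases hw : w ∈ pvS dados P
      · -- an already-seen duplicated value: A appends i to its group, in place
        have hnod : (pvS dados P).Nodup := PySem.Set.nodup_ofList _
        have hcnt : (PySem.List.count (pvS dados P) w == 0) = false := by
          simp [PySem.List.count, List.count_eq_zero]
          exact hw
        have hk0 : (List.idxOf? w (pvS dados P)).isSome = true := List.isSome_idxOf?.mpr hw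
        obtain ⟨k, hk⟩ := Option.isSome_iff_exists.mp hk0
        have hS : pvS dados (P ++ [(i, w)]) = pvS dados P := by
          rw [pvS, hfa]
          simp only [List.map_append, List.map_cons, List.map_nil]
          rw [pv_ofList_append]
          exact pv_add_mem (pvS dados P) w hw
        have hG : ∀ v ∈ pvS dados P,
            pvG dados (P ++ [(i, w)]) v = (if v = w then pvG dados P v ++ [i] else pvG dados P v) := by
          intro v hv
          by_cases hvw : v = w
          · subst hvw
            simp [pvG, List.filter_append, hcb]
          · have hbe : ¬ w = v := fun h => hvw h.symm
            simp [pvG, List.filter_append, hbe, hvw]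
        simp only [pvStepA, if_pos hc, hcnt, Bool.false_eq_true, if_false,
          PySem.List.index?, hk]
        rw [pv_map_modify_of_idxOf? _ hnod _ _ _ _ hk, hS, Prod.mk.injEq]
        refine ⟨rfl, ?_⟩
        exact (List.map_congr_left hG).symm
      · -- a fresh duplicated value: A opens a new group at the end
        have hcnt : (PySem.List.count (pvS dados P) w == 0) = true := by
          simp [PySem.List.count, List.count_eq_zero]
          exact hw
        have hS : pvS dados (P ++ [(i, w)]) = pvS dados P ++ [w] := by
          rw [pvS, hfa]
          simp only [List.map_append, List.map_cons, List.map_nil]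
          rw [pv_ofList_append]
          exact pv_add_not_mem (pvS dados P) w hw
        have hGw : pvG dados P w = [] := by
          rw [pvG, List.map_eq_nil_iff, List.filter_eq_nil_iff]
          rintro ⟨j, u⟩ hp hcond
          rw [Bool.and_eq_true, beq_iff_eq] at hcond
          apply hw
          rw [pvS, PySem.Set.mem_ofList]
          exact List.mem_map.mpr ⟨(j, u), List.mem_filter.mpr ⟨hp, hcond.2⟩, hcond.1⟩
        have hG : ∀ v ∈ pvS dados P, pvG dados (P ++ [(i, w)]) v = pvG dados P v := by
          intro v hv
          have hbe : ¬ w = v := fun h => hw (h ▸ hv)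
          simp [pvG, List.filter_append, hbe]
        have hG'w : pvG dados (P ++ [(i, w)]) w = [i] := by
          rw [pvG, List.filter_append, List.map_append]
          have h1 : List.filter (fun p => p.2 == w && pvCnt dados p.2) [(i, w)] = [(i, w)] := by
            simp [hcb]
          have h2 : (List.filter (fun p => p.2 == w && pvCnt dados p.2) P).map
              (fun p => p.1) = pvG dados P w := rfl
          rw [h1, h2, hGw]
          simp
        simp only [pvStepA, if_pos hc, hcnt, if_true]
        rw [hS, Prod.mk.injEq]
        refine ⟨rfl, ?_⟩
        simp only [List.map_append, List.map_cons, List.map_nil]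
        rw [hG'w]
        exact congrArg (· ++ [[i]]) (List.map_congr_left hG).symm
    · -- a value that is not duplicated at all: A skips it
      have hcb : pvCnt dados w = false := by simpa [pvCnt, PySem.List.count] using hc
      have hS : pvS dados (P ++ [(i, w)]) = pvS dados P := by
        simp [pvS, List.filter_append, hcb]
      have hGfun : pvG dados (P ++ [(i, w)]) = pvG dados P := by
        funext v
        simp [pvG, List.filter_append, hcb]
      simp only [pvStepA, if_neg hc]
      rw [hS, hGfun]

lemma pv_ofList_filter {α : Type} [BEq α] [LawfulBEq α] (q : α → Bool) (xs : List α) :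
    PySem.Set.ofList (xs.filter q) = (PySem.Set.ofList xs).filter q := by
  have aux : ∀ (ys s : List α), (ys.foldl PySem.Set.add s).filter q
      = (ys.filter q).foldl PySem.Set.add (s.filter q) := by
    intro ys
    induction ys with
    | nil => intro s; simp
    | cons x t ih =>
      intro s
      have hstep : (PySem.Set.add s x).filter q
          = if q x then PySem.Set.add (s.filter q) x else s.filter q := by
        by_cases hx : x ∈ s
        · have h1 : PySem.Set.add s x = s := by
            simp [PySem.Set.add, PySem.Set.contains, hx]
          cases hqx : q x with
          | true =>
            have : x ∈ s.filter q := List.mem_filter.mpr ⟨hx, hqx⟩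
            rw [h1]
            simp [PySem.Set.add, PySem.Set.contains, this]
          | false => simp [h1]
        · have h1 : PySem.Set.add s x = s ++ [x] := by
            simp [PySem.Set.add, PySem.Set.contains, hx]
          cases hqx : q x with
          | true =>
            have hx' : x ∉ s.filter q := fun h => hx (List.mem_filter.mp h).1
            rw [h1]
            simp [List.filter_append, hqx, PySem.Set.add, PySem.Set.contains, hx']
          | false =>
            rw [h1]
            simp [List.filter_append, hqx]
      rw [List.foldl_cons, ih, hstep, List.filter_cons]
      cases hqx : q x <;> simp
  rw [PySem.Set.ofList_eq_foldl, PySem.Set.ofList_eq_foldl, aux]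
  simp

def pvSepCat (ss : List String) : String := ss.foldr (fun a acc => ", " ++ a ++ acc) ""

def pvMsgStep (arquivo : List (Int × List String)) (L : Int) (m : String) (q : Int × Int) : String :=
  (if q.1 ≠ 0 then (if q.1 < L - 1 then m ++ ", " else m ++ " e ") else m)
    ++ PySem.Int.toStr (((PySem.List.pyGet? arquivo q.2).getD (0, [])).1 + 1)

lemma pv_join_cons (p : String) (ps : List String) :
    PySem.Str.join ", " (p :: ps) = p ++ pvSepCat ps := by
  induction ps generalizing p with
  | nil =>
    rw [← String.toList_inj]
    simp [PySem.Str.toList_join, PySem.Chars.join_singleton, pvSepCat]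
  | cons q rest ih =>
    have hcc : PySem.Str.join ", " (p :: q :: rest) = p ++ ", " ++ PySem.Str.join ", " (q :: rest) := by
      rw [← String.toList_inj]
      simp [PySem.Str.toList_join, PySem.Chars.join_cons_cons, String.toList_append]
    rw [hcc, ih]
    simp [pvSepCat, String.append_assoc]

lemma pv_tailA (arquivo : List (Int × List String)) (L : Int) (t : List Int) :
    ∀ (x : Int) (s : Int) (m : String), 1 ≤ s → s + 1 + t.length = L →
    (PySem.List.enumerate (x :: t) s).foldl (pvMsgStep arquivo L) m
      = m ++ pvSepCat ((x :: t).dropLast.map (pvPart arquivo)) ++ " e "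
        ++ pvPart arquivo ((x :: t).getLastD 0) := by
  induction t with
  | nil =>
    intro x s m hs hL
    rw [PySem.List.enumerate_cons]
    simp only [List.length_nil, Nat.cast_zero, add_zero] at hL
    have h1 : s ≠ 0 := by omega
    have h2 : ¬ (s < L - 1) := by omega
    simp only [PySem.List.enumerate, List.foldl_cons, List.foldl_nil]
    rw [pvMsgStep, if_pos h1, if_neg h2]
    simp [pvSepCat, pvPart, String.append_assoc]
  | cons y t' ih =>
    intro x s m hs hL
    rw [PySem.List.enumerate_cons, List.foldl_cons]
    simp only [List.length_cons] at hL
    have h1 : s ≠ 0 := by omega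
    have h2 : s < L - 1 := by push_cast at hL; omega
    have hstep : pvMsgStep arquivo L m (s, x) = m ++ ", " ++ pvPart arquivo x := by
      rw [pvMsgStep, if_pos h1, if_pos h2]
      simp [pvPart, String.append_assoc]
    rw [hstep, ih y (s + 1) _ (by omega) (by push_cast at hL ⊢; omega)]
    simp [pvSepCat, String.append_assoc]

lemma pv_getLastD_map (arquivo : List (Int × List String)) (l : List Int) (d : Int) (hl : l ≠ []) :
    (l.map (pvPart arquivo)).getLastD "" = pvPart arquivo (l.getLastD d) := by
  obtain ⟨z, hz⟩ := Option.isSome_iff_exists.mp (List.getLast?_isSome.mpr hl)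
  simp [List.getLastD_eq_getLast?, List.getLast?_map, hz]

-- message equality on one duplicated group
lemma pv_msg_eq (arquivo : List (Int × List String)) (v : String) (g : List Int)
    (hg : 2 ≤ g.length)
    (hv : ((PySem.List.pyGet? (((PySem.List.pyGet? arquivo ((PySem.List.pyGet? g 0).getD 0)).getD (0, [])).2) 0).getD "") = v) :
    pvMsgA arquivo g = pvMsgB arquivo v g := by
  rcases g with _ | ⟨a, _ | ⟨y, t⟩⟩
  · simp at hg
  · simp at hg
  · rw [pvMsgA, hv]
    have key : (PySem.List.enumerate (a :: y :: t) 0).foldl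
        (pvMsgStep arquivo ((a :: y :: t).length : Int))
        ("Erro, o mesmo dado [" ++ v
          ++ "] foi mencionado mais de uma vez, mantes em somente uma das seguintes linhas [isso não é um erro, é a indicação de uma redundância no arquivo]: ")
        = ("Erro, o mesmo dado [" ++ v
          ++ "] foi mencionado mais de uma vez, mantes em somente uma das seguintes linhas [isso não é um erro, é a indicação de uma redundância no arquivo]: ")
          ++ pvPart arquivo a ++ pvSepCat ((y :: t).dropLast.map (pvPart arquivo)) ++ " e "
          ++ pvPart arquivo ((y :: t).getLastD 0) := by
      rw [PySem.List.enumerate_cons, List.foldl_cons]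
      have h0 : ∀ m : String, pvMsgStep arquivo ((a :: y :: t).length : Int) m (0, a)
          = m ++ pvPart arquivo a := by
        intro m
        rw [pvMsgStep]
        simp [pvPart]
      rw [h0, zero_add,
        pv_tailA arquivo ((a :: y :: t).length : Int) t y 1 _ (by omega) (by push_cast; simp; ring)]
    rw [show (PySem.List.enumerate (a :: y :: t) 0).foldl
        (fun (m : String) (q : Int × Int) =>
          (if q.1 ≠ 0 then (if q.1 < ((a :: y :: t).length : Int) - 1 then m ++ ", " else m ++ " e ") else m)
          ++ PySem.Int.toStr (((PySem.List.pyGet? arquivo q.2).getD (0, [])).1 + 1))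
        ("Erro, o mesmo dado [" ++ v
          ++ "] foi mencionado mais de uma vez, mantes em somente uma das seguintes linhas [isso não é um erro, é a indicação de uma redundância no arquivo]: ")
      = (PySem.List.enumerate (a :: y :: t) 0).foldl
        (pvMsgStep arquivo ((a :: y :: t).length : Int))
        ("Erro, o mesmo dado [" ++ v
          ++ "] foi mencionado mais de uma vez, mantes em somente uma das seguintes linhas [isso não é um erro, é a indicação de uma redundância no arquivo]: ") from rfl]
    rw [key]
    rw [pvMsgB]
    have hdl : ((a :: y :: t).map (pvPart arquivo)).dropLast
        = pvPart arquivo a :: ((y :: t).dropLast.map (pvPart arquivo)) := by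
      rw [← List.map_dropLast]
      rfl
    have hlast : ((a :: y :: t).map (pvPart arquivo)).getLastD ""
        = pvPart arquivo ((y :: t).getLastD 0) := by
      rw [pv_getLastD_map arquivo _ 0 (by simp)]
      rfl
    rw [hdl, hlast, pv_join_cons]
    simp [String.append_assoc]

lemma pv_S_filter (dados : List String) :
    pvS dados (PySem.List.enumerate dados 0) = (PySem.Set.ofList dados).filter (pvCnt dados) := by
  rw [pvS, ← pv_ofList_filter]
  congr 1
  have h1 : dados.filter (pvCnt dados)
      = ((PySem.List.enumerate dados 0).map (fun p => p.2)).filter (pvCnt dados) := by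
    rw [PySem.List.map_snd_enumerate]
  rw [h1, List.filter_map]
  rfl

lemma pv_len_GA (dados : List String) (v : String) :
    (((PySem.List.enumerate dados 0).filter (fun p => p.2 == v)).map (fun p => p.1)).length
      = PySem.List.count dados v := by
  rw [List.length_map, ← List.countP_eq_length_filter]
  have h1 : PySem.List.count dados v
      = List.countP (fun x => x == v) ((PySem.List.enumerate dados 0).map (fun p => p.2)) := by
    rw [PySem.List.map_snd_enumerate, PySem.List.count, List.count_eq_countP]
  rw [h1, List.countP_map]
  rfl

-- the first line index stored for a value really carries that value
lemma pv_head_val (arquivo : List (Int × List String)) (v : String)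
    (hne : ((PySem.List.enumerate (arquivo.map (fun r => (PySem.List.pyGet? r.2 0).getD "")) 0).filter
      (fun p => p.2 == v)).map (fun p => p.1) ≠ []) :
    ((PySem.List.pyGet? (((PySem.List.pyGet? arquivo
      ((PySem.List.pyGet? (((PySem.List.enumerate (arquivo.map (fun r => (PySem.List.pyGet? r.2 0).getD "")) 0).filter
        (fun p => p.2 == v)).map (fun p => p.1)) 0).getD 0)).getD (0, [])).2) 0).getD "") = v := by
  set key : (Int × List String) → String := fun r => (PySem.List.pyGet? r.2 0).getD "" with hkey
  set dados := arquivo.map key with hdados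
  rcases hF : (PySem.List.enumerate dados 0).filter (fun p => p.2 == v) with _ | ⟨p, rest⟩
  · rw [hF] at hne
    simp at hne
  · rw [hF]
    have hp : p ∈ (PySem.List.enumerate dados 0).filter (fun p => p.2 == v) := by
      rw [hF]
      exact List.mem_cons_self
    have hpE : p ∈ PySem.List.enumerate dados 0 := (List.mem_filter.mp hp).1
    have hpv : p.2 = v := by
      have := (List.mem_filter.mp hp).2
      simpa using this
    obtain ⟨k, hk, hpk⟩ := (PySem.List.mem_enumerate_iff dados 0 p).mp hpE
    have hk' : k < arquivo.length := by
      rw [hdados, List.length_map] at hk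
      exact hk
    have h0 : PySem.List.pyGet? ((p.1 :: List.map (fun p => p.1) rest)) 0 = some p.1 := by
      simp [PySem.List.pyGet?, PySem.List.pyIdx?]
    rw [List.map_cons, h0, Option.getD_some, hpk]
    simp only [zero_add]
    rw [PySem.List.pyGet?_natCast, List.getElem?_eq_getElem hk', Option.getD_some]
    show key arquivo[k] = v
    have h3 : dados[k] = key arquivo[k] := by
      simp [hdados]
    have hv' : dados[k] = v := by
      rw [hpk] at hpv
      simpa using hpv
    exact h3.symm.trans hv'

-- B's partition loop, characterised: on any value-closed sub-multiset P of enumerate(dados)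
-- it appends exactly one message per duplicated value of P, in first-occurrence order
lemma pv_loopB_eq (arquivo : List (Int × List String)) (dados : List String) :
    ∀ (n : Nat) (P : List (Int × String)) (erro : List String), P.length ≤ n →
    (∀ p ∈ P, P.filter (fun q => q.2 == p.2)
        = (PySem.List.enumerate dados 0).filter (fun q => q.2 == p.2)) →
    pvLoopB arquivo P erro = erro ++ (pvS dados P).map (fun v =>
      pvMsgB arquivo v (((PySem.List.enumerate dados 0).filter (fun q => q.2 == v)).map (fun q => q.1))) := by
  intro n
  induction n with
  | zero =>
    intro P erro hlen _
    have : P = [] := List.eq_nil_of_length_eq_zero (Nat.le_zero.mp hlen)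
    subst this
    simp [pvLoopB, pvS]
  | succ n ih =>
    intro P erro hlen hclosed
    match P with
    | [] => simp [pvLoopB, pvS]
    | p :: t =>
      have hlen_t : t.length ≤ n := by
        simp only [List.length_cons] at hlen
        omega
      have hself : (p :: t).filter (fun q => q.2 == p.2)
          = (PySem.List.enumerate dados 0).filter (fun q => q.2 == p.2) :=
        hclosed p List.mem_cons_self
      have hresto_t : (p :: t).filter (fun q => !(q.2 == p.2))
          = t.filter (fun q => !(q.2 == p.2)) := by
        simp
      have hlen' : ((p :: t).filter (fun q => !(q.2 == p.2))).length ≤ n := by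
        rw [hresto_t]
        exact le_trans (List.length_filter_le _ t) hlen_t
      have hclosed' : ∀ q ∈ (p :: t).filter (fun q => !(q.2 == p.2)),
          ((p :: t).filter (fun q => !(q.2 == p.2))).filter (fun r => r.2 == q.2)
            = (PySem.List.enumerate dados 0).filter (fun r => r.2 == q.2) := by
        intro q hq
        have hqmem : q ∈ p :: t := (List.mem_filter.mp hq).1
        have hqne : ¬ (q.2 = p.2) := by
          have := (List.mem_filter.mp hq).2
          simpa using this
        have h1 : ((p :: t).filter (fun q => !(q.2 == p.2))).filter (fun r => r.2 == q.2)
            = (p :: t).filter (fun r => r.2 == q.2) := by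
          rw [List.filter_filter]
          apply List.filter_congr
          intro x _
          cases hx : (x.2 == q.2) with
          | false => simp
          | true =>
            have hxq : x.2 = q.2 := by simpa using hx
            have hxp : ¬ (x.2 = p.2) := by rw [hxq]; exact hqne
            simp [hxp]
        rw [h1]
        exact hclosed q hqmem
      -- the set of duplicated values of P, one partition step
      have hrestoS : pvS dados ((p :: t).filter (fun q => !(q.2 == p.2)))
          = (pvS dados (p :: t)).filter (fun w => !(w == p.2)) ∧
          pvS dados (p :: t)
            = (if pvCnt dados p.2 then
                p.2 :: (pvS dados ((p :: t).filter (fun q => !(q.2 == p.2))))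
              else pvS dados ((p :: t).filter (fun q => !(q.2 == p.2)))) := by
        have hcomm : (t.filter (fun q => !(q.2 == p.2))).filter (fun q => pvCnt dados q.2)
            = (t.filter (fun q => pvCnt dados q.2)).filter (fun q => !(q.2 == p.2)) := by
          rw [List.filter_filter, List.filter_filter]
          apply List.filter_congr
          intro x _
          rw [Bool.and_comm]
        have hmapf : ((t.filter (fun q => pvCnt dados q.2)).filter (fun q => !(q.2 == p.2))).map
              (fun q => q.2)
            = ((t.filter (fun q => pvCnt dados q.2)).map (fun q => q.2)).filter
              (fun w => !(w == p.2)) := by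
          rw [List.filter_map]
          rfl
        have hres : pvS dados ((p :: t).filter (fun q => !(q.2 == p.2)))
            = (PySem.Set.ofList ((t.filter (fun q => pvCnt dados q.2)).map (fun q => q.2))).filter
              (fun w => !(w == p.2)) := by
          rw [hresto_t, pvS, hcomm, hmapf, pv_ofList_filter]
        by_cases hcv : pvCnt dados p.2 = true
        · have hfc : (p :: t).filter (fun q => pvCnt dados q.2)
              = p :: t.filter (fun q => pvCnt dados q.2) := by
            simp [hcv]
          have hS : pvS dados (p :: t)
              = p.2 :: (PySem.Set.ofList ((t.filter (fun q => pvCnt dados q.2)).map (fun q => q.2))).discard p.2 := by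
            rw [pvS, hfc, List.map_cons, PySem.Set.ofList_cons]
          have hdisc : (PySem.Set.ofList ((t.filter (fun q => pvCnt dados q.2)).map (fun q => q.2))).discard p.2
              = (PySem.Set.ofList ((t.filter (fun q => pvCnt dados q.2)).map (fun q => q.2))).filter
                (fun w => !(w == p.2)) := by
            simp [PySem.Set.discard]
          constructor
          · rw [hres, hS, List.filter_cons]
            simp [hdisc, List.filter_filter]
          · rw [if_pos hcv, hres, hS, hdisc]
        · have hfc : (p :: t).filter (fun q => pvCnt dados q.2)
              = t.filter (fun q => pvCnt dados q.2) := by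
            simp [Bool.eq_false_iff.mp (by simpa using hcv)]
          have hnomem : ∀ w ∈ PySem.Set.ofList ((t.filter (fun q => pvCnt dados q.2)).map (fun q => q.2)),
              (!(w == p.2)) = true := by
            intro w hw
            rw [PySem.Set.mem_ofList] at hw
            obtain ⟨x, hx, hxw⟩ := List.mem_map.mp hw
            have hcx : pvCnt dados x.2 = true := (List.mem_filter.mp hx).2
            have : w ≠ p.2 := by
              intro h
              rw [hxw, h] at hcx
              rw [hcx] at hcv
              exact hcv rfl
            simpa using this
          have hid : (PySem.Set.ofList ((t.filter (fun q => pvCnt dados q.2)).map (fun q => q.2))).filter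
                (fun w => !(w == p.2))
              = PySem.Set.ofList ((t.filter (fun q => pvCnt dados q.2)).map (fun q => q.2)) :=
            List.filter_eq_self.mpr hnomem
          constructor
          · rw [hres, pvS, hfc, hid]
          · rw [if_neg (by simpa using hcv), hres, pvS, hfc, hid]
      -- the branch test of B is exactly pvCnt
      have hcond : ((((p :: t).filter (fun q => q.2 == p.2)).map (fun q => q.1)).length > 1)
          ↔ pvCnt dados p.2 = true := by
        rw [hself, pv_len_GA]
        simp [pvCnt]
      rw [pvLoopB]
      by_cases hcv : pvCnt dados p.2 = true
      · rw [if_pos (hcond.mpr hcv), ih _ _ hlen' hclosed', hrestoS.2, if_pos hcv]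
        rw [List.map_cons, hself, List.append_assoc]
        rfl
      · rw [if_neg (fun h => hcv (hcond.mp h)), ih _ _ hlen' hclosed', hrestoS.2,
          if_neg (by simpa using hcv)]

-- ===== VERDICT (by name: the statement is the Claim_ definition above) =====
theorem dontrepete_especialSingleUp_spec : Claim_equal_dontrepete_especialSingleUp := by
  intro arquivo hdom hpre
  unfold Spec_dontrepete_especialSingleUp
  simp only [dontrepete_especialSingleUp, dontrepete_especialSingleUp_alt]
  rw [pv_loopA,
    PySem.List.foldl_append_singleton_eq_map (f := pvMsgA arquivo)]
  simp only [List.nil_append]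
  set key : (Int × List String) → String := fun r => (PySem.List.pyGet? r.2 0).getD "" with hkey
  set dados := arquivo.map key with hdados
  set E := PySem.List.enumerate dados 0 with hEdef
  set GA : String → List Int := fun v => (E.filter (fun p => p.2 == v)).map (fun p => p.1)
    with hGAdef
  have hpares : (PySem.List.enumerate arquivo 0).map (fun p => (p.1, (PySem.List.pyGet? p.2.2 0).getD ""))
      = E := by
    rw [hEdef, hdados, pv_enumerate_map]
  rw [hpares]
  have hB : pvLoopB arquivo E [] = (pvS dados E).map (fun v => pvMsgB arquivo v (GA v)) := by
    rw [pv_loopB_eq arquivo dados E.length E [] le_rfl (fun p _ => rfl)]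
    simp [hGAdef, hEdef]
  rw [hB]
  set S := pvS dados E with hSdef
  have hcntS : ∀ v ∈ S, pvCnt dados v = true := by
    intro v hv
    rw [hSdef, pv_S_filter] at hv
    exact (List.mem_filter.mp hv).2
  have hlen2 : ∀ v ∈ S, 2 ≤ (GA v).length := by
    intro v hv
    have h1 := hcntS v hv
    rw [pvCnt, decide_eq_true_eq] at h1
    rw [hGAdef]
    have := pv_len_GA dados v
    simp only [hEdef] at this ⊢
    omega
  have hGv : ∀ v ∈ S, pvG dados E v = GA v := by
    intro v hv
    rw [pvG, hGAdef]
    congr 1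
    apply List.filter_congr
    intro p _
    cases hb : (p.2 == v) with
    | false => simp
    | true =>
      have : p.2 = v := by simpa using hb
      simp [this, hcntS v hv]
  have herr : (S.map (pvG dados E)).map (pvMsgA arquivo)
      = S.map (fun v => pvMsgB arquivo v (GA v)) := by
    rw [List.map_map]
    apply List.map_congr_left
    intro v hv
    simp only [Function.comp]
    rw [hGv v hv]
    refine pv_msg_eq arquivo v (GA v) (hlen2 v hv) ?_
    have hne : GA v ≠ [] := by
      have := hlen2 v hv
      intro h
      rw [h] at this
      simp at this
    exact pv_head_val arquivo v hne
  rw [herr]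
  simp only [List.length_map]
  by_cases h0 : S.length > 0
  · rw [if_pos h0, if_pos h0]
  · rw [if_neg h0, if_neg h0]
    have hS0 : S = [] := List.eq_nil_of_length_eq_zero (by omega)
    rw [hS0]
    simp
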